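-- pv_equiv track=rewrite | github.com/mechanicalgirl/congressional-summaries | dailyrecord/digest.py | clean_digest
-- ===== SOURCE A (Python) =====
-- def split_oversized(text, max_size=200_000):
--     """Last resort: split by character count, trying to break on paragraph boundaries."""
--     chunks = []
--     while len(text) > max_size:
--         # Try to find a paragraph break near the limit
--         split_at = text.rfind('\n\n', 0, max_size)
--         if split_at == -1:
--             split_at = text.rfind('\n', 0, max_size)
--         if split_at == -1:
--             split_at = max_size  # hard cut if no newlines found
--         chunks.append(text[:split_at])
--         text = text[split_at:]
--     if text:
--         chunks.append(text)
--     return chunks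
--
-- def clean_digest(text, max_size=200_000):
--     text = text.replace('<pre>', '').replace('</pre>', '').replace('&#x27;', "'")
--     text = text.replace('  ', ' ').replace('  ', ' ').replace('  ', ' ')
--     text = text.replace("From the Congressional Record Online through the Government Publishing Office [<a href='https://www.gpo.gov'>www.gpo.gov</a>]", '')
--
--     chunks = []
--     for section in text.split('____________________'):
--         section = section.replace('\n', '')
--         if not section:
--             continue
--
--         if len(section) > max_size:
--             for subsection in section.split('______'):
--                 if not subsection:
--                     continue
--                 if len(subsection) > max_size:
--                     chunks.extend(split_oversized(subsection, max_size))
--                 else: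
--                     chunks.append(subsection)
--         else:
--             chunks.append(section)
--
--     # Greedy bin-packing (unchanged from before)
--     bins = []
--     current_bin = []
--     current_size = 0
--
--     for chunk in chunks:
--         chunk_size = len(chunk)
--         if current_size + chunk_size <= max_size:
--             current_bin.append(chunk)
--             current_size += chunk_size
--         else:
--             if current_bin:
--                 bins.append('\n'.join(current_bin))
--             current_bin = [chunk]
--             current_size = chunk_size
--
--     if current_bin:
--         bins.append('\n'.join(current_bin))
--
--     return bins
-- ===== SOURCE B (Python) =====
-- def split_oversized(text, max_size=200_000):
--     """Last resort: split by character count, trying to break on paragraph boundaries."""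
--     chunks = []
--     while len(text) > max_size:
--         split_at = text.rfind('\n\n', 0, max_size)
--         if split_at == -1:
--             split_at = text.rfind('\n', 0, max_size)
--         if split_at == -1:
--             split_at = max_size
--         chunks.append(text[:split_at])
--         text = text[split_at:]
--     if text:
--         chunks.append(text)
--     return chunks
--
-- def _shatter(t, delims, max_size):
--     """Split t on the first delimiter; recurse with the rest on still-oversized
--     non-empty fragments; fall back to split_oversized when delimiters run out."""
--     if len(t) <= max_size:
--         return [t]
--     if not delims:
--         return split_oversized(t, max_size)
--     out = []
--     for frag in t.split(delims[0]):
--         if frag: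
--             out.extend(_shatter(frag, delims[1:], max_size))
--     return out
--
-- def clean_digest(text, max_size=200_000):
--     for old, new in (('<pre>', ''), ('</pre>', ''), ('&#x27;', "'"),
--                      ('  ', ' '), ('  ', ' '), ('  ', ' '),
--                      ("From the Congressional Record Online through the Government Publishing Office [<a href='https://www.gpo.gov'>www.gpo.gov</a>]", '')):
--         text = text.replace(old, new)
--
--     chunks = []
--     for section in text.split('____________________'):
--         section = section.replace('\n', '')
--         if section:
--             chunks.extend(_shatter(section, ['______'], max_size))
--
--     bins = []
--     current = []
--     size = 0
--     for chunk in chunks: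
--         if size + len(chunk) > max_size and current:
--             bins.append(current)
--             current = []
--             size = 0
--         current.append(chunk)
--         size += len(chunk)
--     if current:
--         bins.append(current)
--     return ['\n'.join(b) for b in bins]
-- ===== Notes on version B (the rewrite author's own statement) =====
-- stated objective: simpler
-- what changed: The hard-coded two-level split with its inline oversized cascade becomes one recursive helper over an ordered delimiter list (falling back to the unchanged split_oversized), the cleaning replaces become one fold over (old,new) pairs, and the bin packer collects bins as lists of chunks joined only at the end.
import Mathlib
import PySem

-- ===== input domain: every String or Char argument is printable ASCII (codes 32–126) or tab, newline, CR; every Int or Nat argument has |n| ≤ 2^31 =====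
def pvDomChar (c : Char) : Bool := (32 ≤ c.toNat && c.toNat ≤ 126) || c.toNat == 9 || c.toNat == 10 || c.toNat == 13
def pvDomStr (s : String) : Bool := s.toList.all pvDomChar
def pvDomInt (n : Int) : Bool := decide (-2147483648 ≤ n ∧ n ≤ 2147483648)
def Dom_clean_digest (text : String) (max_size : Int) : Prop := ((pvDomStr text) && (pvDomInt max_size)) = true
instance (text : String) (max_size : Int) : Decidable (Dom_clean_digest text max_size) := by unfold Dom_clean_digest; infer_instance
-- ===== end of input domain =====

-- B replaces A's hard-coded two-level split-and-cascade by one recursive delimiter-cascade helper and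
-- collects the bins as lists joined only at the end (objective: simpler decomposition, same cost).

-- ===== PORT A =====
-- py: s.split(sep) for a non-empty literal sep (PySem.Str.split? is none only for sep = "")
def pySplit (s sep : String) : List String := (PySem.Str.split? s sep).getD []

-- transliteration of split_oversized's while-loop; the fuel (len(text)+1) is only a totality
-- guard (the Python loop can fail to shorten text only when max_size ≤ 0 or text has a newline
-- before position max_size, where the Python diverges; nothing is claimed about values there).
def split_oversized_loop (max_size : Int) : Nat → String → List String → List String
  | 0, text, chunks =>
      if PySem.Str.len text ≠ 0 then chunks ++ [text] else chunks
  | fuel + 1, text, chunks =>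
      if PySem.Str.len text > max_size then
        let s1 := PySem.Str.rfindFrom text "\n\n" 0 (some max_size)
        let s2 := if s1 = -1 then PySem.Str.rfindFrom text "\n" 0 (some max_size) else s1
        let split_at := if s2 = -1 then max_size else s2
        split_oversized_loop max_size fuel (PySem.Str.slice text (some split_at) none)
          (chunks ++ [PySem.Str.slice text none (some split_at)])
      else if PySem.Str.len text ≠ 0 then chunks ++ [text] else chunks

-- shared helper of both Python versions (B keeps split_oversized verbatim)
def split_oversized (text : String) (max_size : Int) : List String :=
  split_oversized_loop max_size ((PySem.Str.len text).toNat + 1) text []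

-- A's cleaning phase: the chain of replaces, in source order
def cdA_clean (text : String) : String :=
  PySem.Str.replace (PySem.Str.replace (PySem.Str.replace (PySem.Str.replace (PySem.Str.replace
    (PySem.Str.replace (PySem.Str.replace text "<pre>" "") "</pre>" "") "&#x27;" "'") "  " " ")
    "  " " ") "  " " ")
    "From the Congressional Record Online through the Government Publishing Office [<a href='https://www.gpo.gov'>www.gpo.gov</a>]" ""

-- A's chunk-collecting loop: hard-coded two-level split with the oversized cascade
def cdA_collect (max_size : Int) (t : String) : List String :=
  (pySplit t "____________________").foldl (fun chunks sec =>
    let s := PySem.Str.replace sec "\n" ""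
    if PySem.Str.len s = 0 then chunks
    else if PySem.Str.len s > max_size then
      (pySplit s "______").foldl (fun chunks sub =>
        if PySem.Str.len sub = 0 then chunks
        else if PySem.Str.len sub > max_size then chunks ++ split_oversized sub max_size
        else chunks ++ [sub]) chunks
    else chunks ++ [s]) []

-- A's greedy bin-packing loop (state: bins, current_bin, current_size)
def cdA_pack (max_size : Int) (chunks : List String) : List String :=
  let st := chunks.foldl (fun (st : List String × List String × Int) chunk =>
    let cs := PySem.Str.len chunk
    if st.2.2 + cs ≤ max_size then (st.1, st.2.1 ++ [chunk], st.2.2 + cs)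
    else if st.2.1 ≠ [] then (st.1 ++ [PySem.Str.join "\n" st.2.1], [chunk], cs)
    else (st.1, [chunk], cs)) ([], [], 0)
  if st.2.1 ≠ [] then st.1 ++ [PySem.Str.join "\n" st.2.1] else st.1

def clean_digest (text : String) (max_size : Int) : List String :=
  cdA_pack max_size (cdA_collect max_size (cdA_clean text))

-- ===== PORT B =====
-- recursion over the ordered delimiter list; falls back to split_oversized when it is exhausted
def shatter (max_size : Int) (delims : List String) (t : String) : List String :=
  if PySem.Str.len t ≤ max_size then [t]
  else match delims with
    | [] => split_oversized t max_size
    | d :: rest =>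
      (pySplit t d).foldl (fun out frag =>
        if PySem.Str.len frag ≠ 0 then out ++ shatter max_size rest frag else out) []

-- B's cleaning phase: one fold over the (old, new) pairs
def cdB_clean (text : String) : String :=
  [("<pre>", ""), ("</pre>", ""), ("&#x27;", "'"), ("  ", " "), ("  ", " "), ("  ", " "),
   ("From the Congressional Record Online through the Government Publishing Office [<a href='https://www.gpo.gov'>www.gpo.gov</a>]", "")].foldl
    (fun s p => PySem.Str.replace s p.1 p.2) text

-- B's chunk collection: top-level split, newline strip, then the recursive cascade
def cdB_collect (max_size : Int) (t : String) : List String :=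
  (pySplit t "____________________").foldl (fun chunks sec =>
    let s := PySem.Str.replace sec "\n" ""
    if PySem.Str.len s ≠ 0 then chunks ++ shatter max_size ["______"] s else chunks) []

-- B's packer: collects bins as lists of chunks, joins only at the end
def cdB_pack (max_size : Int) (chunks : List String) : List String :=
  let st := chunks.foldl (fun (st : List (List String) × List String × Int) chunk =>
    let st := if st.2.2 + PySem.Str.len chunk > max_size ∧ st.2.1 ≠ [] then
                (st.1 ++ [st.2.1], ([] : List String), (0 : Int))
              else st
    (st.1, st.2.1 ++ [chunk], st.2.2 + PySem.Str.len chunk)) ([], [], 0)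
  let binsL := if st.2.1 ≠ [] then st.1 ++ [st.2.1] else st.1
  binsL.map (fun b => PySem.Str.join "\n" b)

def clean_digest_alt (text : String) (max_size : Int) : List String :=
  cdB_pack max_size (cdB_collect max_size (cdB_clean text))

-- ===== PRECONDITION & SPEC =====
def Spec_clean_digest (text : String) (max_size : Int) (out : List String) : Prop := out = clean_digest_alt text max_size
instance (text : String) (max_size : Int) (out : List String) : Decidable (Spec_clean_digest text max_size out) := by unfold Spec_clean_digest; infer_instance

-- ===== CLAIM (what is proved, stated in full; the proofs are below) =====
def Claim_equal_clean_digest : Prop := ∀ (text : String) (max_size : Int), Dom_clean_digest text max_size → Spec_clean_digest text max_size (clean_digest text max_size)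

-- ===== LEMMAS AND PROOFS =====

theorem shatter_nil (m : Int) (t : String) :
    shatter m [] t = if PySem.Str.len t ≤ m then [t] else split_oversized t m := by
  rw [shatter]

theorem shatter_cons (m : Int) (d : String) (rest : List String) (t : String) :
    shatter m (d :: rest) t = if PySem.Str.len t ≤ m then [t]
      else (pySplit t d).foldl (fun out frag =>
        if PySem.Str.len frag ≠ 0 then out ++ shatter m rest frag else out) [] := by
  rw [shatter]

-- a fold body that either skips or appends g x is a flatMap
theorem foldl_skip_extend {α β : Type} (p : α → Prop) [DecidablePred p] (g : α → List β) :
    ∀ (l : List α) (acc : List β),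
      l.foldl (fun acc x => if p x then acc ++ g x else acc) acc
        = acc ++ l.flatMap (fun x => if p x then g x else []) := by
  intro l acc
  have hbody : (fun (acc : List β) (x : α) => if p x then acc ++ g x else acc)
      = fun acc x => acc ++ (if p x then g x else []) := by
    funext acc x; split_ifs <;> simp
  rw [hbody, PySem.List.foldl_append_eq_flatMap]

-- A's inner subsection loop as a flatMap of the delimiter-exhausted cascade
theorem innerA_eq (m : Int) (s : String) (acc : List String) :
    (pySplit s "______").foldl (fun chunks sub =>
        if PySem.Str.len sub = 0 then chunks
        else if PySem.Str.len sub > m then chunks ++ split_oversized sub m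
        else chunks ++ [sub]) acc
      = acc ++ (pySplit s "______").flatMap (fun sub =>
          if PySem.Str.len sub ≠ 0 then shatter m [] sub else []) := by
  have hbody : (fun (chunks : List String) (sub : String) =>
        if PySem.Str.len sub = 0 then chunks
        else if PySem.Str.len sub > m then chunks ++ split_oversized sub m
        else chunks ++ [sub])
      = fun chunks sub => chunks ++ (if PySem.Str.len sub ≠ 0 then shatter m [] sub else []) := by
    funext chunks sub
    by_cases h0 : PySem.Str.len sub = 0
    · rw [if_pos h0, if_neg (not_not_intro h0), List.append_nil]
    · rw [if_neg h0, if_pos h0, shatter_nil]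
      by_cases hg : PySem.Str.len sub > m
      · rw [if_pos hg, if_neg (not_le.mpr hg)]
      · rw [if_neg hg, if_pos (not_lt.mp hg)]
  rw [hbody, PySem.List.foldl_append_eq_flatMap]

-- the two chunk-collecting loops produce the same list
theorem chunks_eq (m : Int) (t : String) : cdA_collect m t = cdB_collect m t := by
  unfold cdA_collect cdB_collect
  have hbody : ∀ (chunks : List String) (sec : String),
      (let s := PySem.Str.replace sec "\n" ""
       if PySem.Str.len s = 0 then chunks
       else if PySem.Str.len s > m then
         (pySplit s "______").foldl (fun chunks sub =>
           if PySem.Str.len sub = 0 then chunks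
           else if PySem.Str.len sub > m then chunks ++ split_oversized sub m
           else chunks ++ [sub]) chunks
       else chunks ++ [s])
      = (let s := PySem.Str.replace sec "\n" ""
         if PySem.Str.len s ≠ 0 then chunks ++ shatter m ["______"] s else chunks) := by
    intro chunks sec
    set s := PySem.Str.replace sec "\n" "" with hs
    by_cases h0 : PySem.Str.len s = 0
    · rw [if_pos h0, if_neg (not_not_intro h0)]
    · rw [if_neg h0, if_pos h0, shatter_cons]
      by_cases hg : PySem.Str.len s > m
      · rw [if_pos hg, if_neg (not_le.mpr hg), innerA_eq,
            foldl_skip_extend (fun frag => PySem.Str.len frag ≠ 0) (shatter m [] ·),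
            List.nil_append]
      · rw [if_neg hg, if_pos (not_lt.mp hg)]
  have hfun : (fun (chunks : List String) (sec : String) =>
      let s := PySem.Str.replace sec "\n" ""
      if PySem.Str.len s = 0 then chunks
      else if PySem.Str.len s > m then
        (pySplit s "______").foldl (fun chunks sub =>
          if PySem.Str.len sub = 0 then chunks
          else if PySem.Str.len sub > m then chunks ++ split_oversized sub m
          else chunks ++ [sub]) chunks
      else chunks ++ [s])
    = (fun (chunks : List String) (sec : String) =>
      let s := PySem.Str.replace sec "\n" ""
      if PySem.Str.len s ≠ 0 then chunks ++ shatter m ["______"] s else chunks) :=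
    funext fun c => funext fun x => hbody c x
  rw [hfun]

-- the two bin-packing loops agree, given the invariant 'current bin empty → size 0'
theorem pack_eq_aux (m : Int) : ∀ (chunks : List String) (bB : List (List String))
    (cur : List String) (size : Int), (cur = [] → size = 0) →
    (let st := chunks.foldl (fun (st : List String × List String × Int) chunk =>
        let cs := PySem.Str.len chunk
        if st.2.2 + cs ≤ m then (st.1, st.2.1 ++ [chunk], st.2.2 + cs)
        else if st.2.1 ≠ [] then (st.1 ++ [PySem.Str.join "\n" st.2.1], [chunk], cs)
        else (st.1, [chunk], cs)) (bB.map (fun b => PySem.Str.join "\n" b), cur, size)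
     if st.2.1 ≠ [] then st.1 ++ [PySem.Str.join "\n" st.2.1] else st.1)
    = (let st := chunks.foldl (fun (st : List (List String) × List String × Int) chunk =>
        let st := if st.2.2 + PySem.Str.len chunk > m ∧ st.2.1 ≠ [] then
                    (st.1 ++ [st.2.1], ([] : List String), (0 : Int))
                  else st
        (st.1, st.2.1 ++ [chunk], st.2.2 + PySem.Str.len chunk)) (bB, cur, size)
       (if st.2.1 ≠ [] then st.1 ++ [st.2.1] else st.1).map (fun b => PySem.Str.join "\n" b)) := by
  intro chunks
  induction chunks with
  | nil =>
    intro bB cur size _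
    by_cases hc : cur = [] <;> simp [hc]
  | cons chunk rest ih =>
    intro bB cur size hinv
    simp only [List.foldl_cons]
    by_cases hle : size + PySem.Str.len chunk ≤ m
    · have hB : ¬ (size + PySem.Str.len chunk > m ∧ cur ≠ []) := by
        intro h; exact absurd hle (not_le.mpr h.1)
      simp only [hle, if_true, hB, if_false]
      exact ih bB (cur ++ [chunk]) (size + PySem.Str.len chunk) (by simp)
    · have hgt : size + PySem.Str.len chunk > m := not_le.mp hle
      by_cases hc : cur = []
      · have hz : size = 0 := hinv hc
        have hB : ¬ (size + PySem.Str.len chunk > m ∧ cur ≠ []) := by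
          intro h; exact h.2 hc
        simp only [if_false, hc, ne_eq, not_true, hz]
        simpa using ih bB ([] ++ [chunk]) (0 + PySem.Str.len chunk) (by simp)
      · have hB : size + PySem.Str.len chunk > m ∧ cur ≠ [] := ⟨hgt, hc⟩
        simp only [if_false, hc, ne_eq, not_false_iff, hB, if_true, hle]
        simpa using ih (bB ++ [cur]) ([] ++ [chunk]) (0 + PySem.Str.len chunk) (by simp)

theorem pack_eq (m : Int) (chunks : List String) : cdA_pack m chunks = cdB_pack m chunks := by
  unfold cdA_pack cdB_pack
  simpa using pack_eq_aux m chunks [] [] 0 (fun _ => rfl)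

-- the two cleaning phases are the same chain of replaces
theorem clean_eq (text : String) : cdA_clean text = cdB_clean text := rfl

-- ===== VERDICT (by name: the statement is the Claim_ definition above) =====
theorem clean_digest_spec : Claim_equal_clean_digest := by
  intro text m _
  unfold Spec_clean_digest clean_digest clean_digest_alt
  rw [clean_eq, chunks_eq, pack_eq]
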